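-- pv_equiv track=rewrite | github.com/ednow/algorithms | PTA/PTA1007/MaximumSubsequenceSum.py | split_positive_negative
-- ===== SOURCE A (Python) =====
-- from typing import List, Generator
--
-- def split_positive_negative(nums: List[int]) -> List[List[int]]:
--     result = []
--     # 正负分割
--     positive = False if nums[0] < 0 else True
--     start = 0
--     end = 0
--     isChange = False
--     for i in range(1, len(nums)):
--         iPositive = False if nums[i] < 0 else True
--         # 如果符号不相等
--         if not(positive is iPositive):
--             result.append(nums[start:i].copy())
--             start = i
--             positive = not positive
--             isChange = True
--     # if start == len(nums) - 1:  # 考虑最后一位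
--     result.append(nums[start:].copy())
--     if not isChange:
--         return [nums]
--
--     return result
-- ===== SOURCE B (Python) =====
-- def split_positive_negative(nums):
--     # right-to-left chunking: repeatedly find the start of the run ending at i,
--     # slice it out, and prepend-by-reverse; no sign flags or change bookkeeping.
--     out = []
--     i = len(nums)
--     while i > 0:
--         j = i - 1
--         while j > 0 and (nums[j - 1] >= 0) == (nums[i - 1] >= 0):
--             j -= 1
--         out.append(nums[j:i])
--         i = j
--     out.reverse()
--     return out
-- ===== Notes on version B (the rewrite author's own statement) =====
-- stated objective: alternative
-- what changed: B replaces A's single left-to-right element scan with carried sign/start/isChange state by a right-to-left chunking loop: repeatedly find the start of the run ending at the current position with an inner scan anchored at the run's last element, emit that slice, then reverse the collected runs; it keeps no sign flag, no running start, and no change flag, and has no single-run special case.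
import Mathlib
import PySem

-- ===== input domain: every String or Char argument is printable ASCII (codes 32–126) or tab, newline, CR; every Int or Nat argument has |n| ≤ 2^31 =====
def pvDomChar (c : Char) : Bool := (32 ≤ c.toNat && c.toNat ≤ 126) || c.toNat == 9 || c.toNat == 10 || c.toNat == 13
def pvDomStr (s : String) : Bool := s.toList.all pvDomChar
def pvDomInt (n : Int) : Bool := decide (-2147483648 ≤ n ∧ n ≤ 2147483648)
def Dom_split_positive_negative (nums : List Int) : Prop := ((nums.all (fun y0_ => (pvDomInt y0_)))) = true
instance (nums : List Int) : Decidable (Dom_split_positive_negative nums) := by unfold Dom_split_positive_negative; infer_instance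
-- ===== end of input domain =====

-- B chunks the list right-to-left into sign runs (inner scan anchored at each run's last element,
-- one final reverse) instead of A's left-to-right scan with sign/start/isChange state;
-- equivalence is about the return VALUE (neither mutates its argument).

-- ===== PORT A =====
-- loop body of A's for-loop; state = (result, positive, start, isChange)
def pvStepA (nums : List Int) (st : List (List Int) × Bool × Int × Bool) (i : Int) :
    List (List Int) × Bool × Int × Bool :=
  let iPositive := if PySem.List.pyGetD nums i 0 < 0 then false else true
  if st.2.1 ≠ iPositive then
    (st.1 ++ [PySem.List.slice nums (some st.2.2.1) (some i)], !st.2.1, i, true)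
  else st

def split_positive_negative (nums : List Int) : List (List Int) :=
  let positive := if PySem.List.pyGetD nums 0 0 < 0 then false else true
  let s := (PySem.List.pyRange 1 (nums.length : Int) 1).foldl (pvStepA nums) ([], positive, 0, false)
  let result := s.1 ++ [PySem.List.slice nums (some s.2.2.1) none]
  if s.2.2.2 = false then [nums] else result

-- ===== PORT B =====
-- B's inner while loop: scan left from j while nums[j-1] has the same sign as nums[i-1]
-- (both accesses are in range under the 0 < j / j < i guards, so getD is exact here)
def pvFindJ (nums : List Int) (i : Nat) (j : Nat) : Nat :=
  if 0 < j ∧ (decide (0 ≤ nums.getD (j - 1) 0) = decide (0 ≤ nums.getD (i - 1) 0)) then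
    pvFindJ nums i (j - 1)
  else j
termination_by j

-- result bound that the outer loop's termination proof cites
theorem pvFindJ_le (nums : List Int) (i j : Nat) : pvFindJ nums i j ≤ j := by
  induction j using Nat.strong_induction_on with
  | _ j ih =>
    unfold pvFindJ
    split
    · rename_i h
      exact le_trans (ih (j - 1) (by omega)) (by omega)
    · exact le_refl j

-- B's outer while loop: out grows by append (Python list.append), reversed afterwards
def pvChunkB (nums : List Int) (i : Nat) (out : List (List Int)) : List (List Int) :=
  if hpos : 0 < i then
    let j := pvFindJ nums i (i - 1)
    pvChunkB nums j (out ++ [PySem.List.slice nums (some (j : Int)) (some (i : Int))])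
  else out
termination_by i
decreasing_by
  have := pvFindJ_le nums i (i - 1); omega

def split_positive_negative_alt (nums : List Int) : List (List Int) :=
  (pvChunkB nums nums.length []).reverse

-- ===== PRECONDITION & SPEC =====
-- Pre_ excludes only the empty list, on which A raises IndexError at its first element access.
def Pre_split_positive_negative (nums : List Int) : Prop := nums ≠ []
instance (nums : List Int) : Decidable (Pre_split_positive_negative nums) := by
  unfold Pre_split_positive_negative; infer_instance
def pvWitness_split_positive_negative : List Int := [1, -2, 3]

def Spec_split_positive_negative (nums : List Int) (out : List (List Int)) : Prop :=
  out = split_positive_negative_alt nums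
instance (nums : List Int) (out : List (List Int)) : Decidable (Spec_split_positive_negative nums out) := by
  unfold Spec_split_positive_negative; infer_instance

-- ===== CLAIM (what is proved, stated in full; the proofs are below) =====
def Claim_equal_split_positive_negative : Prop := ∀ (nums : List Int),
  Dom_split_positive_negative nums → Pre_split_positive_negative nums →
  Spec_split_positive_negative nums (split_positive_negative nums)

-- ===== LEMMAS AND PROOFS =====

-- sign of an element, as both programs test it
def pvSgn (x : Int) : Bool := decide (0 ≤ x)

-- canonical run decomposition from the left: the proofs' middle spec
def pvRuns : List Int → List (List Int)
  | [] => []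
  | x :: xs =>
      (x :: xs.takeWhile (fun y => pvSgn y == pvSgn x)) ::
        pvRuns (xs.dropWhile (fun y => pvSgn y == pvSgn x))
termination_by l => l.length
decreasing_by
  simp only [List.length_cons]
  exact Nat.lt_succ_of_le (List.length_dropWhile_le _ _)

lemma pvRuns_nil : pvRuns [] = [] := by rw [pvRuns]

lemma pvRuns_single (r : List Int) (s : Bool) (hr : r ≠ []) (hs : ∀ y ∈ r, pvSgn y = s) :
    pvRuns r = [r] := by
  obtain ⟨y, r', rfl⟩ := List.exists_cons_of_ne_nil hr
  rw [pvRuns]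
  have hy : pvSgn y = s := hs y (by simp)
  have hall : ∀ z ∈ r', (fun z => pvSgn z == pvSgn y) z = true := by
    intro z hz
    simp [hs z (by simp [hz]), hy]
  rw [List.takeWhile_eq_self_iff.mpr hall, List.dropWhile_eq_nil_iff.mpr hall, pvRuns_nil]

-- appending one whole run on the right appends one run to pvRuns
lemma pvRuns_append (s : Bool) : ∀ (n : Nat) (l r : List Int), l.length ≤ n → r ≠ [] →
    (∀ y ∈ r, pvSgn y = s) → (∀ x, l.getLast? = some x → pvSgn x ≠ s) →
    pvRuns (l ++ r) = pvRuns l ++ [r] := by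
  intro n
  induction n with
  | zero =>
    intro l r hl hr hs _
    have : l = [] := by cases l <;> simp_all
    subst this
    rw [List.nil_append, pvRuns_nil, List.nil_append]
    exact pvRuns_single r s hr hs
  | succ n ih =>
    intro l r hl hr hs hlast
    match l with
    | [] =>
      rw [List.nil_append, pvRuns_nil, List.nil_append]
      exact pvRuns_single r s hr hs
    | x :: xs =>
      rw [List.cons_append, pvRuns, pvRuns, List.takeWhile_append, List.dropWhile_append]
      have hlastne := hlast _ (List.getLast?_eq_some_getLast (l := x :: xs) (by simp))
      by_cases hall : ∀ y ∈ xs, (fun y => pvSgn y == pvSgn x) y = true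
      · -- whole of xs is in the first run; r starts a new run
        have htw : List.takeWhile (fun y => pvSgn y == pvSgn x) xs = xs :=
          List.takeWhile_eq_self_iff.mpr hall
        have hdw : List.dropWhile (fun y => pvSgn y == pvSgn x) xs = [] :=
          List.dropWhile_eq_nil_iff.mpr hall
        have hxne : pvSgn x ≠ s := by
          cases hxs : xs with
          | nil => subst hxs; simpa using hlastne
          | cons a as =>
            intro hc
            apply hlastne
            subst hxs
            rw [List.getLast_cons (by simp)]
            have := hall _ (List.getLast_mem (l := a :: as) (by simp))
            simp only [beq_iff_eq] at this
            rw [this, hc]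
        obtain ⟨y, r', rfl⟩ := List.exists_cons_of_ne_nil hr
        have hpy : (pvSgn y == pvSgn x) = false := by
          rw [hs y (by simp)]
          exact beq_eq_false_iff_ne.mpr (fun hc => hxne hc.symm)
        rw [List.takeWhile_cons, List.dropWhile_cons, htw, hdw]
        simp only [hpy, Bool.false_eq_true, if_false, List.isEmpty_nil, List.append_nil, if_true]
        rw [pvRuns_nil, pvRuns_single (y :: r') s (by simp) hs]
        simp
      · -- the first run ends inside xs
        push Not at hall
        have hne : List.dropWhile (fun y => pvSgn y == pvSgn x) xs ≠ [] := by
          intro hc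
          obtain ⟨y, hy1, hy2⟩ := hall
          have := List.dropWhile_eq_nil_iff.mp hc y hy1
          simp_all
        have hlen : (List.takeWhile (fun y => pvSgn y == pvSgn x) xs).length ≠ xs.length := by
          intro hc
          have := List.takeWhile_eq_self_iff.mp
            (List.IsPrefix.eq_of_length (List.takeWhile_prefix _) hc)
          obtain ⟨y, hy1, hy2⟩ := hall
          exact hy2 (this y hy1)
        rw [if_neg hlen, if_neg (by simpa using hne)]
        have hlast' : ∀ z, (List.dropWhile (fun y => pvSgn y == pvSgn x) xs).getLast? = some z →
            pvSgn z ≠ s := by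
          intro z hz
          apply hlast
          obtain ⟨t, ht⟩ := List.dropWhile_suffix (l := xs) (fun y => pvSgn y == pvSgn x)
          rw [← ht, ← List.cons_append, List.getLast?_append_of_ne_nil _ hne]
          exact hz
        have hlen2 : (List.dropWhile (fun y => pvSgn y == pvSgn x) xs).length ≤ n := by
          have := List.length_dropWhile_le (fun y => pvSgn y == pvSgn x) xs
          simp only [List.length_cons] at hl
          omega
        rw [ih _ r hlen2 hr hs hlast']
        simp

-- pvFindJ's result marks the start of the run ending at index i-1
lemma pvFindJ_spec (nums : List Int) (i : Nat) : ∀ (j : Nat),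
    (pvFindJ nums i j = 0 ∨
      pvSgn (nums.getD (pvFindJ nums i j - 1) 0) ≠ pvSgn (nums.getD (i - 1) 0)) ∧
    (∀ m, pvFindJ nums i j ≤ m → m < j → pvSgn (nums.getD m 0) = pvSgn (nums.getD (i - 1) 0)) := by
  intro j
  induction j using Nat.strong_induction_on with
  | _ j ih =>
    rw [pvFindJ]
    split
    · rename_i hcond
      obtain ⟨hj, heq⟩ := hcond
      obtain ⟨h1, h2⟩ := ih (j - 1) (by omega)
      refine ⟨h1, ?_⟩
      intro m hm1 hm2
      by_cases hmj : m < j - 1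
      · exact h2 m hm1 hmj
      · have : m = j - 1 := by omega
        subst this
        exact heq
    · rename_i hcond
      refine ⟨?_, fun m h1 h2 => absurd (lt_of_le_of_lt h1 h2) (lt_irrefl _)⟩
      by_cases hj : j = 0
      · exact Or.inl hj
      · right
        intro hc
        exact hcond ⟨by omega, hc⟩

-- B's outer loop collects the reversed runs of the prefix
lemma pvChunkB_eq (nums : List Int) : ∀ (i : Nat) (out : List (List Int)), i ≤ nums.length →
    pvChunkB nums i out = out ++ (pvRuns (nums.take i)).reverse := by
  intro i
  induction i using Nat.strong_induction_on with
  | _ i ih =>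
    intro out hi
    by_cases h0 : 0 < i
    · rw [pvChunkB, dif_pos h0]
      have hjle := pvFindJ_le nums i (i - 1)
      obtain ⟨hstart, hrun⟩ := pvFindJ_spec nums i (i - 1)
      set j := pvFindJ nums i (i - 1) with hj
      set s := pvSgn (nums.getD (i - 1) 0) with hsdef
      clear_value j s
      have hji : j < i := by omega
      have hjlen : j ≤ nums.length := le_trans (le_of_lt hji) hi
      -- the emitted slice is the run [j, i)
      have hslice : PySem.List.slice nums (some (j : Int)) (some (i : Int)) =
          (nums.drop j).take (i - j) := by
        rw [PySem.List.slice_toNat nums (by positivity) (by positivity)]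
        simp
      have hseg : (nums.take i).drop j = (nums.drop j).take (i - j) := List.drop_take ..
      have hsplit : nums.take i = nums.take j ++ (nums.drop j).take (i - j) := by
        conv_lhs => rw [← List.take_append_drop j (nums.take i)]
        rw [List.take_take, min_eq_left (le_of_lt hji), hseg]
      have hsegne : (nums.drop j).take (i - j) ≠ [] := by
        have : ((nums.drop j).take (i - j)).length = min (i - j) (nums.length - j) := by simp
        intro hc
        rw [hc] at this
        simp at this
        omega
      have hsegsgn : ∀ y ∈ (nums.drop j).take (i - j), pvSgn y = s := by
        intro y hy
        obtain ⟨idx, hidx, rfl⟩ := List.mem_iff_getElem.mp hy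
        have hlt : j + idx < i := by
          have := hidx
          simp at this
          omega
        have hidx2 : j + idx < nums.length := by omega
        have hval : ((nums.drop j).take (i - j))[idx] = nums[j + idx] := by
          rw [List.getElem_take, List.getElem_drop]
        rw [hval]
        by_cases hlast : j + idx = i - 1
        · rw [hsdef, List.getD_eq_getElem nums 0 (show i - 1 < nums.length by omega)]
          exact congrArg pvSgn (getElem_congr rfl hlast hidx2)
        · have := hrun (j + idx) (by omega) (by omega)
          rw [← this, List.getD_eq_getElem nums 0 hidx2]
      have hprevlast : ∀ x, (nums.take j).getLast? = some x → pvSgn x ≠ s := by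
        intro x hx
        rcases hstart with h | h
        · rw [h] at hx
          simp at hx
        · have hjpos : 0 < j := by
            rcases Nat.eq_zero_or_pos j with h0' | h0'
            · rw [h0'] at hx; simp at hx
            · exact h0'
          have hne : nums.take j ≠ [] := by
            intro hc
            rcases List.take_eq_nil_iff.mp hc with h' | h'
            · omega
            · rw [h'] at hi; simp at hi; omega
          have hjm : j - 1 < nums.length := lt_of_lt_of_le (Nat.sub_lt hjpos Nat.one_pos) hjlen
          have : x = nums[j - 1]'hjm := by
            rw [List.getLast?_eq_some_getLast hne] at hx
            injection hx with h2
            rw [← h2, List.getLast_eq_getElem, List.getElem_take]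
            simp [List.length_take, min_eq_left hjlen]
          rw [this]
          intro hc
          apply h
          rw [← hc]
          congr 1
          exact List.getD_eq_getElem nums 0 hjm
      have hruns : pvRuns (nums.take i) = pvRuns (nums.take j) ++ [(nums.drop j).take (i - j)] := by
        rw [hsplit]
        exact pvRuns_append s (nums.take j).length _ _ (le_refl _) hsegne hsegsgn hprevlast
      rw [ih j hji _ (by omega), hslice, hruns]
      simp
    · have : i = 0 := by omega
      subst this
      rw [pvChunkB]
      simp [pvRuns_nil]

lemma pvB_eq_runs (nums : List Int) : split_positive_negative_alt nums = pvRuns nums := by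
  unfold split_positive_negative_alt
  rw [pvChunkB_eq nums nums.length [] (le_refl _)]
  simp

-- finalization shared by A's two return paths
def pvFin (nums : List Int) (st : List (List Int) × Bool × Int × Bool) : List (List Int) :=
  st.1 ++ [PySem.List.slice nums (some st.2.2.1) none]

-- A's loop does nothing while the sign does not change
lemma pvFold_noop (nums : List Int) (b : Bool) :
    ∀ (l : List Int) (res : List (List Int)) (st0 : Int) (c : Bool),
    (∀ m ∈ l, (if PySem.List.pyGetD nums m 0 < 0 then false else true) = b) →
    l.foldl (pvStepA nums) (res, b, st0, c) = (res, b, st0, c) := by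
  intro l
  induction l with
  | nil => intro res st0 c _; rfl
  | cons a t ih =>
    intro res st0 c h
    simp only [List.foldl_cons]
    have hstep : pvStepA nums (res, b, st0, c) a = (res, b, st0, c) := by
      simp only [pvStepA, h a (by simp)]
      simp
    rw [hstep]
    exact ih res st0 c (fun m hm => h m (by simp [hm]))

lemma pv_sign_if (x : Int) : (if x < 0 then false else true) = pvSgn x := by
  unfold pvSgn
  rcases lt_or_ge x 0 with h | h
  · simp [h, not_le.mpr h]
  · simp [not_lt.mpr h, h]

-- A's fold, started at the beginning of a run, finalizes to the runs of the suffix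
lemma pvAfold (nums : List Int) : ∀ (d s : Nat), nums.length - s ≤ d → s < nums.length →
    ∀ (res : List (List Int)) (c : Bool),
    pvFin nums ((PySem.List.pyRange ((s : Int) + 1) (nums.length : Int) 1).foldl (pvStepA nums)
        (res, pvSgn (nums.getD s 0), (s : Int), c)) = res ++ pvRuns (nums.drop s) := by
  intro d
  induction d with
  | zero => intro s h1 h2; omega
  | succ d ih =>
    intro s hd hs res c
    have hdrop : nums.drop s = nums.getD s 0 :: nums.drop (s + 1) := by
      rw [List.getD_eq_getElem _ _ hs]
      exact List.drop_eq_getElem_cons hs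
    set x := nums.getD s 0 with hx
    set t := (nums.drop (s + 1)).takeWhile (fun y => pvSgn y == pvSgn x) with ht
    set k := t.length with hk
    set j := s + 1 + k with hjdef
    have hk1 : k ≤ nums.length - (s + 1) := by
      have h1 := (List.takeWhile_prefix (l := nums.drop (s + 1)) (fun y => pvSgn y == pvSgn x)).length_le
      rw [← ht, List.length_drop] at h1
      omega
    have hjle : j ≤ nums.length := by omega
    have httake : t = (nums.drop (s + 1)).take k :=
      hk ▸ List.prefix_iff_eq_take.mp (List.takeWhile_prefix _)
    have hslicej : PySem.List.slice nums (some (s : Int)) (some (j : Int)) = x :: t := by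
      rw [PySem.List.slice_toNat nums (by positivity) (by positivity)]
      simp only [Int.toNat_natCast]
      rw [show j - s = k + 1 by omega, hdrop, List.take_succ_cons, ← httake]
    have hsplitrange : PySem.List.pyRange ((s : Int) + 1) (nums.length : Int) 1 =
        PySem.List.pyRange ((s : Int) + 1) (j : Int) 1 ++
          PySem.List.pyRange (j : Int) (nums.length : Int) 1 :=
      PySem.List.pyRange_one_append _ _ _ (by omega) (by omega)
    have hnoop : (PySem.List.pyRange ((s : Int) + 1) (j : Int) 1).foldl (pvStepA nums)
        (res, pvSgn x, (s : Int), c) = (res, pvSgn x, (s : Int), c) := by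
      apply pvFold_noop
      intro m hm
      rw [PySem.List.mem_pyRange_one] at hm
      obtain ⟨mn, rfl⟩ := Int.eq_ofNat_of_zero_le (show 0 ≤ m by omega)
      rw [PySem.List.pyGetD_natCast, pv_sign_if]
      have hmn1 : s + 1 ≤ mn := by exact_mod_cast hm.1
      have hmn2 : mn < j := by exact_mod_cast hm.2
      have hidx : mn - (s + 1) < t.length := by omega
      have hmem : (pvSgn (t[mn - (s + 1)]'hidx) == pvSgn x) = true :=
        List.mem_takeWhile_imp (p := fun y => pvSgn y == pvSgn x) (l := nums.drop (s + 1))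
          (by rw [← ht]; exact List.getElem_mem hidx)
      have hval : t[mn - (s + 1)]'hidx = nums.getD mn 0 := by
        have hpre : t <+: nums.drop (s + 1) := by rw [ht]; exact List.takeWhile_prefix _
        rw [List.IsPrefix.getElem hpre hidx, List.getElem_drop,
          List.getD_eq_getElem _ _ (show mn < nums.length by omega)]
        exact getElem_congr rfl (by omega) (by omega)
      rw [← hval]
      simpa using hmem
    rw [hsplitrange, List.foldl_append, hnoop]
    by_cases hjn : j = nums.length
    · -- the run reaches the end of the list: the remaining range is empty
      rw [show PySem.List.pyRange (j : Int) (nums.length : Int) 1 = [] from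
        PySem.List.pyRange_one_eq_nil (by rw [hjn])]
      simp only [List.foldl_nil, pvFin]
      rw [PySem.List.slice_from _ (by positivity)]
      simp only [Int.toNat_natCast]
      have hteq : t = nums.drop (s + 1) :=
        (List.takeWhile_prefix _).eq_of_length (by rw [← ht, List.length_drop]; omega)
      have hdwnil : (nums.drop (s + 1)).dropWhile (fun y => pvSgn y == pvSgn x) = [] :=
        List.dropWhile_eq_nil_iff.mpr (List.takeWhile_eq_self_iff.mp (ht ▸ hteq))
      rw [hdrop, pvRuns, hdwnil, pvRuns_nil, ← ht, hteq]
    · -- sign flip at j: one step, then the induction hypothesis from j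
      have hjlt : j < nums.length := by omega
      have hdj : nums.drop j = nums.getD j 0 :: nums.drop (j + 1) := by
        rw [List.getD_eq_getElem _ _ hjlt]
        exact List.drop_eq_getElem_cons hjlt
      have hdw : (nums.drop (s + 1)).dropWhile (fun y => pvSgn y == pvSgn x) = nums.drop j := by
        calc (nums.drop (s + 1)).dropWhile (fun y => pvSgn y == pvSgn x)
            = List.drop t.length
              (t ++ (nums.drop (s + 1)).dropWhile (fun y => pvSgn y == pvSgn x)) :=
              List.drop_left.symm
          _ = List.drop k (nums.drop (s + 1)) := by
              rw [ht, List.takeWhile_append_dropWhile, ← hk]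
          _ = nums.drop j := by rw [List.drop_drop, hjdef, Nat.add_comm (s + 1) k]
      have hdwne : nums.drop j ≠ [] := by
        intro hc
        have := congrArg List.length hc
        rw [List.length_drop] at this
        simp at this
        omega
      have hflip : pvSgn (nums.getD j 0) ≠ pvSgn x := by
        have hne' : (nums.drop (s + 1)).dropWhile (fun y => pvSgn y == pvSgn x) ≠ [] := by
          rw [hdw]; exact hdwne
        have h2 := List.head_dropWhile_not (fun y => pvSgn y == pvSgn x) hne'
        have h3 : (nums.drop (s + 1)).dropWhile (fun y => pvSgn y == pvSgn x) =
            nums.getD j 0 :: nums.drop (j + 1) := by rw [hdw, hdj]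
        rw [show ((nums.drop (s + 1)).dropWhile (fun y => pvSgn y == pvSgn x)).head hne' =
          nums.getD j 0 from by simp only [h3, List.head_cons]] at h2
        simpa using h2
      have hstep : pvStepA nums (res, pvSgn x, (s : Int), c) (j : Int) =
          (res ++ [PySem.List.slice nums (some (s : Int)) (some (j : Int))],
            !(pvSgn x), (j : Int), true) := by
        simp only [pvStepA, PySem.List.pyGetD_natCast, pv_sign_if]
        rw [if_pos (show pvSgn x ≠ pvSgn (nums.getD j 0) from fun hc => hflip hc.symm)]
      have hbool : (!pvSgn x) = pvSgn (nums.getD j 0) := (Bool.eq_not_of_ne hflip).symm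
      rw [PySem.List.pyRange_one_cons (by omega), List.foldl_cons, hstep, hbool,
        ih j (by omega) hjlt (res ++ [PySem.List.slice nums (some (s : Int)) (some (j : Int))]) true]
      rw [hdrop, pvRuns, ← ht, hdw, hslicej]
      simp

-- isChange stays true once set
lemma pvStepA_c_true (nums : List Int) : ∀ (l : List Int) (st : List (List Int) × Bool × Int × Bool),
    st.2.2.2 = true → (l.foldl (pvStepA nums) st).2.2.2 = true := by
  intro l
  induction l with
  | nil => intro st h; exact h
  | cons a t ih =>
    intro st h
    simp only [List.foldl_cons]
    apply ih
    simp only [pvStepA]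
    split <;> (try split) <;> simp_all

-- if isChange is still false at the end, the state never moved
lemma pvFold_c_false (nums : List Int) : ∀ (l : List Int) (st : List (List Int) × Bool × Int × Bool),
    st.2.2.2 = false → (l.foldl (pvStepA nums) st).2.2.2 = false →
    l.foldl (pvStepA nums) st = st := by
  intro l
  induction l with
  | nil => intro st _ _; rfl
  | cons a t ih =>
    intro st h hf
    simp only [List.foldl_cons] at hf ⊢
    by_cases hs : pvStepA nums st a = st
    · rw [hs] at hf ⊢; exact ih st h hf
    · exfalso
      have hc : (pvStepA nums st a).2.2.2 = true := by
        simp only [pvStepA] at hs ⊢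
        split at hs <;> split at hs <;> simp_all
      rw [pvStepA_c_true nums t _ hc] at hf
      simp at hf

lemma pvA_eq_runs (nums : List Int) (h : nums ≠ []) :
    split_positive_negative nums = pvRuns nums := by
  have hlen : 0 < nums.length := List.length_pos_of_ne_nil h
  have hmain := pvAfold nums nums.length 0 (by omega) hlen [] false
  simp only [Nat.cast_zero, zero_add, List.drop_zero, List.nil_append, pvFin] at hmain
  unfold split_positive_negative
  have hpos : (if PySem.List.pyGetD nums 0 0 < 0 then false else true) = pvSgn (nums.getD 0 0) := by
    rw [pv_sign_if]
    congr 1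
    simp [pysem]
  rw [hpos]
  set st := (PySem.List.pyRange 1 (nums.length : Int) 1).foldl (pvStepA nums)
    ([], pvSgn (nums.getD 0 0), 0, false) with hst
  by_cases hcc : st.2.2.2 = false
  · rw [if_pos hcc]
    have hid : st = ([], pvSgn (nums.getD 0 0), 0, false) := by
      rw [hst]
      exact pvFold_c_false nums _ _ rfl (hst ▸ hcc)
    rw [hid] at hmain
    simp only [List.nil_append] at hmain
    rw [← hmain, PySem.List.slice_from _ (by norm_num)]
    simp
  · rw [if_neg hcc]
    exact hmain

-- ===== VERDICT (by name: the statement is the Claim_ definition above) =====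
theorem split_positive_negative_spec : Claim_equal_split_positive_negative := by
  intro nums _ hne
  unfold Spec_split_positive_negative
  rw [pvA_eq_runs nums hne, pvB_eq_runs nums]
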